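-- pv_equiv track=rewrite | github.com/keanejxm/keane_code | 金钱小写转大写/translate_num.py | translate_number
-- ===== SOURCE A (Python) =====
-- length_map = {
--     "1": "元",
--     "2": "拾",
--     "3": "佰",
--     "4": "仟",
--     "5": "万",
--     "6": "拾万",
--     "7": "佰万",
--     "8": "仟万",
--     "9": "亿",
--     "10": "拾亿",
--     "11": "佰亿",
--     "12": "仟亿",
-- }
--
-- num_map = {
--     "0": "零",
--     "1": "壹",
--     "2": "贰",
--     "3": "叁",
--     "4": "肆",
--     "5": "伍",
--     "6": "陆",
--     "7": "柒",
--     "8": "捌",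
--     "9": "玖",
-- }
--
-- def translate_number(num, result):
--     if not isinstance(num, list):
--         num = list(str(num))
--     num_length = len(num)
--     num_head = num[0]
--     if num_head == "0":
--         if result[-1] != "零":
--             result += "零"
--     else:
--         result += (num_map[num_head] + length_map[str(num_length)])
--     num.remove(num_head)
--     if num:
--         result = translate_number(num, result)
--     if result.endswith("零"):
--         result =result.rstrip("零") + "元整"
--     return result
-- ===== SOURCE B (Python) =====
-- length_map = {
--     "1": "元",
--     "2": "拾",
--     "3": "佰",
--     "4": "仟",
--     "5": "万",
--     "6": "拾万",
--     "7": "佰万",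
--     "8": "仟万",
--     "9": "亿",
--     "10": "拾亿",
--     "11": "佰亿",
--     "12": "仟亿",
-- }
--
-- num_map = {
--     "0": "零",
--     "1": "壹",
--     "2": "贰",
--     "3": "叁",
--     "4": "肆",
--     "5": "伍",
--     "6": "陆",
--     "7": "柒",
--     "8": "捌",
--     "9": "玖",
-- }
--
-- def translate_number(num, result):
--     if not isinstance(num, list):
--         num = list(str(num))
--     while num:
--         head = num[0]
--         if head == "0":
--             if not result.endswith("零"):
--                 result += "零"
--         else:
--             result += num_map[head] + length_map[str(len(num))]
--         num.pop(0)
--     if result.endswith("零"):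
--         result = result.rstrip("零") + "元整"
--     return result
-- ===== Notes on version B (the rewrite author's own statement) =====
-- stated objective: simpler
-- what changed: Replaces the recursion, which re-checks and re-applies the trailing-零 fixup after every recursive return, with a single left-to-right while loop over the digits followed by exactly one endswith/rstrip fixup after the loop.
import Mathlib
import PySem

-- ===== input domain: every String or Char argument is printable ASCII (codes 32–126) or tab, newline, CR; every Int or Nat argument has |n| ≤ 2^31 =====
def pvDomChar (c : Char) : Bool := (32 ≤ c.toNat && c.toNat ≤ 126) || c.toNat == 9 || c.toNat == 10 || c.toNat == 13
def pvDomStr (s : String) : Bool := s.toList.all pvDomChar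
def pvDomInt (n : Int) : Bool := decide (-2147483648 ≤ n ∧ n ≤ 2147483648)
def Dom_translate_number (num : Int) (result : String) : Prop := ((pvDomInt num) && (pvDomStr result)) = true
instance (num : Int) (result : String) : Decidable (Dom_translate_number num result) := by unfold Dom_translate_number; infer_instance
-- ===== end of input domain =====

-- B replaces A's recursion (which re-applies the trailing-零 fixup at every level) by one
-- while-loop over the digits plus a single fixup after the loop; objective: simpler.
-- A empties a list argument in place; with an int argument (this signature) neither mutates anything.


-- ===== PORT A =====
-- the module-level dicts num_map / length_map (both Pythons use the same ones);
-- lookup of a key that is absent in Python (KeyError) returns "" here — unreachable inside Pre_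
def numMap (c : Char) : String :=
  match c with
  | '0' => "零" | '1' => "壹" | '2' => "贰" | '3' => "叁" | '4' => "肆"
  | '5' => "伍" | '6' => "陆" | '7' => "柒" | '8' => "捌" | '9' => "玖"
  | _ => ""

def lengthMap (n : Nat) : String :=
  match n with
  | 1 => "元" | 2 => "拾" | 3 => "佰" | 4 => "仟" | 5 => "万" | 6 => "拾万"
  | 7 => "佰万" | 8 => "仟万" | 9 => "亿" | 10 => "拾亿" | 11 => "佰亿" | 12 => "仟亿"
  | _ => ""

-- rstrip("零"), ported by hand (PySem.Str.rstrip strips whitespace, not chosen chars): exact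
def rstripLing (s : String) : String :=
  String.ofList ((s.toList.reverse.dropWhile (· == '零')).reverse)

-- the recursive body of A; num[0] on [] (IndexError in Python) never happens: A is entered
-- with the nonempty digit list of str(num) and recurses only on nonempty tails
def tnA : List Char → String → String
  | [], result => result
  | num_head :: rest, result =>
    let num_length := (num_head :: rest).length
    let result :=
      if num_head = '0' then
        -- result[-1] != "零"; result[-1] on "" raises IndexError in Python (outside Pre_)
        if (PySem.Str.pyGet? result (-1)).getD '?' ≠ '零' then result ++ "零" else result
      else
        result ++ (numMap num_head ++ lengthMap num_length)
    let result := if rest ≠ [] then tnA rest result else result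
    if PySem.Str.endswith result "零" then rstripLing result ++ "元整" else result

def translate_number (num : Int) (result : String) : String :=
  tnA (PySem.Int.toStr num).toList result

-- ===== PORT B =====
-- the while loop: consume the digit list front-to-back, appending to result
def tnB : List Char → String → String
  | [], result => result
  | head :: rest, result =>
    tnB rest
      (if head = '0' then
        (if PySem.Str.endswith result "零" then result else result ++ "零")
      else
        result ++ (numMap head ++ lengthMap (head :: rest).length))

def translate_number_alt (num : Int) (result : String) : String :=
  let result := tnB (PySem.Int.toStr num).toList result
  if PySem.Str.endswith result "零" then rstripLing result ++ "元整" else result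

-- ===== PRECONDITION & SPEC =====
-- A raises outside Pre_: KeyError '-' in num_map for num < 0, IndexError (result[-1] on "")
-- for num = 0 with empty result; it returns on every input Pre_ admits (within Dom).
def Pre_translate_number (num : Int) (result : String) : Prop :=
  0 ≤ num ∧ (num = 0 → result ≠ "")
instance (num : Int) (result : String) : Decidable (Pre_translate_number num result) := by
  unfold Pre_translate_number; infer_instance

def pvWitness_translate_number : Int × String := (100, "")

def Spec_translate_number (num : Int) (result : String) (out : String) : Prop :=
  out = translate_number_alt num result
instance (num : Int) (result : String) (out : String) : Decidable (Spec_translate_number num result out) := by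
  unfold Spec_translate_number; infer_instance

-- ===== CLAIM (what is proved, stated in full; the proofs are below) =====
def Claim_equal_translate_number : Prop := ∀ (num : Int) (result : String), Dom_translate_number num result → Pre_translate_number num result → Spec_translate_number num result (translate_number num result)

-- ===== LEMMAS AND PROOFS =====

-- the one-shot fixup, as a named function for the proofs
def fixLing (s : String) : String :=
  if PySem.Str.endswith s "零" then rstripLing s ++ "元整" else s

-- the per-digit steps of the two ports, named for the proofs
def stepA (h : Char) (len : Nat) (r : String) : String :=
  if h = '0' then
    if (PySem.Str.pyGet? r (-1)).getD '?' ≠ '零' then r ++ "零" else r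
  else r ++ (numMap h ++ lengthMap len)

def stepB (h : Char) (len : Nat) (r : String) : String :=
  if h = '0' then (if PySem.Str.endswith r "零" then r else r ++ "零")
  else r ++ (numMap h ++ lengthMap len)

theorem tnA_cons (h : Char) (rest : List Char) (r : String) :
    tnA (h :: rest) r
      = fixLing (if rest ≠ [] then tnA rest (stepA h (rest.length + 1) r)
                 else stepA h (rest.length + 1) r) := rfl

theorem tnB_cons (h : Char) (rest : List Char) (r : String) :
    tnB (h :: rest) r = tnB rest (stepB h (rest.length + 1) r) := rfl

-- endswith s "零" reads the last character
theorem endswith_ling_iff (s : String) :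
    PySem.Str.endswith s "零" = true ↔ s.toList.getLast? = some '零' := by
  rw [show PySem.Str.endswith s "零" = PySem.Chars.endswith s.toList ['零'] from rfl,
    PySem.Chars.endswith_iff, List.getLast?_eq_some_iff]
  constructor
  · rintro ⟨t, ht⟩; exact ⟨t, ht.symm⟩
  · rintro ⟨t, ht⟩; exact ⟨t, ht.symm⟩

-- a string ending in '整' does not end in '零'
theorem endswith_ling_append (s : String) :
    PySem.Str.endswith (s ++ "元整") "零" = false := by
  rw [Bool.eq_false_iff]
  intro h
  rw [endswith_ling_iff] at h
  rw [show (s ++ "元整").toList = s.toList ++ ['元', '整'] by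
    simp [String.toList_append]] at h
  simp [List.getLast?_append] at h

theorem fixLing_idem (s : String) : fixLing (fixLing s) = fixLing s := by
  unfold fixLing
  by_cases h : PySem.Str.endswith s "零" = true
  · rw [if_pos h, endswith_ling_append]
    simp
  · rw [if_neg h, if_neg h]

-- A's zero-branch test (result[-1] != "零") and B's (not endswith) agree on every string
theorem step_eq (h : Char) (len : Nat) (r : String) : stepA h len r = stepB h len r := by
  unfold stepA stepB
  rcases hl : r.toList.getLast? with _ | c
  · have he : PySem.Str.endswith r "零" = false := by
      rw [Bool.eq_false_iff]; intro hc; rw [endswith_ling_iff, hl] at hc; cases hc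
    rw [show PySem.Str.pyGet? r (-1) = PySem.List.pyGet? r.toList (-1) from rfl,
      PySem.List.pyGet?_neg_one, hl, he]
    simp
  · rw [show PySem.Str.pyGet? r (-1) = PySem.List.pyGet? r.toList (-1) from rfl,
      PySem.List.pyGet?_neg_one, hl]
    by_cases hc : c = '零'
    · have he : PySem.Str.endswith r "零" = true := by
        rw [endswith_ling_iff, hl, hc]
      rw [he]; simp [hc]
    · have he : PySem.Str.endswith r "零" = false := by
        rw [Bool.eq_false_iff]; intro h2; rw [endswith_ling_iff, hl] at h2
        exact hc (Option.some.inj h2)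
      rw [he]; simp [hc]

-- main invariant: on a nonempty digit list, A's recursion = B's loop + one final fixup
theorem tnA_eq_fix_tnB (h : Char) (rest : List Char) (r : String) :
    tnA (h :: rest) r = fixLing (tnB (h :: rest) r) := by
  induction rest generalizing h r with
  | nil =>
    rw [tnA_cons, tnB_cons, step_eq]
    simp [tnB]
  | cons h2 rest' ih =>
    rw [tnA_cons, tnB_cons, step_eq,
      if_pos (by simp : (h2 :: rest') ≠ ([] : List Char)),
      ih, fixLing_idem]

-- Nat.toDigitsCore with positive fuel never returns []
theorem toDigitsCore_ne_nil (fuel : Nat) : ∀ (n : Nat) (ds : List Char),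
    Nat.toDigitsCore 10 (fuel + 1) n ds ≠ [] := by
  induction fuel with
  | zero =>
    intro n ds
    rw [show Nat.toDigitsCore 10 1 n ds
        = if n / 10 = 0 then (n % 10).digitChar :: ds
          else Nat.toDigitsCore 10 0 (n / 10) ((n % 10).digitChar :: ds) from rfl]
    split
    · simp
    · rw [show Nat.toDigitsCore 10 0 (n / 10) ((n % 10).digitChar :: ds)
          = (n % 10).digitChar :: ds from rfl]
      simp
  | succ f ih =>
    intro n ds
    rw [show Nat.toDigitsCore 10 (f + 1 + 1) n ds
        = if n / 10 = 0 then (n % 10).digitChar :: ds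
          else Nat.toDigitsCore 10 (f + 1) (n / 10) ((n % 10).digitChar :: ds) from rfl]
    split
    · simp
    · exact ih (n / 10) ((n % 10).digitChar :: ds)

-- str(num) is never the empty string
theorem toStr_ne_nil (n : Int) : (PySem.Int.toStr n).toList ≠ [] := by
  rw [PySem.Int.toList_toStr, PySem.Int.toChars]
  split
  · simp
  · exact toDigitsCore_ne_nil _ _ _

-- ===== VERDICT (by name: the statement is the Claim_ definition above) =====
theorem translate_number_spec : Claim_equal_translate_number := by
  intro num result _ _
  unfold Spec_translate_number translate_number translate_number_alt
  rcases hd : (PySem.Int.toStr num).toList with _ | ⟨h, rest⟩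
  · exact absurd hd (toStr_ne_nil num)
  · exact tnA_eq_fix_tnB h rest result
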